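-- pv_equiv track=rewrite | github.com/B23DCAT011/Python | CodePtit/PY01060.py | solve
-- ===== SOURCE A (Python) =====
-- def solve(s):
--     c=1
--     l=0
--     ok1=0
--     ok2=0
--     for i in range(len(s)):
--         if i%2==1:
--             l+= int(s[i])
--         else:
--             ok1+=1
--             if s[i]!='0':
--                 c*=int(s[i])
--             else:
--                 ok2+=1
--     if ok1 == ok2:
--         c=0
--     return c,l
-- ===== SOURCE B (Python) =====
-- def solve(s):
--     even = [int(ch) for ch in s[0::2]]
--     odd = [int(ch) for ch in s[1::2]]
--     nonzeros = [d for d in even if d != 0]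
--     c = 0
--     if nonzeros:
--         c = 1
--         for d in nonzeros:
--             c *= d
--     return c, sum(odd)
-- ===== Notes on version B (the rewrite author's own statement) =====
-- stated objective: simpler
-- what changed: Replaces the single fused indexed loop with its ok1==ok2 counter trick by position slicing (s[0::2]/s[1::2]), a sum over the odd slice, and a filtered nonzero list whose emptiness replaces the counter comparison.
import Mathlib
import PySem

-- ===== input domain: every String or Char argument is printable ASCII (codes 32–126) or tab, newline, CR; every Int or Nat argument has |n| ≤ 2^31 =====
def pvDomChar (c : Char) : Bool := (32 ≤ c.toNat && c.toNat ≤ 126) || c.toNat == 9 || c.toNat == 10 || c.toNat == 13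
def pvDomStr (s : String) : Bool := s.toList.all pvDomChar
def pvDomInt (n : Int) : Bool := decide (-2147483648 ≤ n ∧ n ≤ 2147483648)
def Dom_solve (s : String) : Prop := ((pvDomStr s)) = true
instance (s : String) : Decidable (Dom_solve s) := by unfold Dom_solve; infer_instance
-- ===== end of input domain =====

-- B replaces A's fused indexed loop with its ok1/ok2 counter trick by position slices,
-- a sum, and a filtered nonzero product with an emptiness test (simpler, same O(n) cost).

-- ===== PORT A =====

-- int(<one-character string>), as both Pythons apply int() to a single character
def pvDigit (ch : Char) : Int := (PySem.Int.ofStr? (String.ofList [ch])).getD 0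

def solve (s : String) : Int × Int :=
  let r := (PySem.List.pyRange 0 (PySem.Str.len s) 1).foldl
    (fun (acc : Int × Int × Int × Int) i =>
      if PySem.Int.mod i 2 = 1 then
        (acc.1, acc.2.1 + ((PySem.Str.pyGet? s i).map pvDigit).getD 0, acc.2.2.1, acc.2.2.2)
      else
        if PySem.Str.pyGet? s i ≠ some '0' then
          (acc.1 * ((PySem.Str.pyGet? s i).map pvDigit).getD 0, acc.2.1, acc.2.2.1 + 1, acc.2.2.2)
        else
          (acc.1, acc.2.1, acc.2.2.1 + 1, acc.2.2.2 + 1))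
    (1, 0, 0, 0)
  (if r.2.2.1 = r.2.2.2 then 0 else r.1, r.2.1)

-- ===== PORT B =====
def solve_alt (s : String) : Int × Int :=
  let even := (((PySem.Str.slice? s (some 0) none 2).getD "").toList).map pvDigit
  let odd := (((PySem.Str.slice? s (some 1) none 2).getD "").toList).map pvDigit
  let nonzeros := even.filter (fun d => d != 0)
  let c := if nonzeros.isEmpty then 0 else nonzeros.foldl (· * ·) 1
  (c, odd.sum)

-- ===== PRECONDITION & SPEC =====
-- A calls int() on every character (except a '0' at an even position, and '0' is a digit),
-- so A returns normally exactly on all-digit strings, the empty string included.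
def Pre_solve (s : String) : Prop := s.toList.all Char.isDigit = true
instance (s : String) : Decidable (Pre_solve s) := by unfold Pre_solve; infer_instance

def pvWitness_solve : String := "9072"

def Spec_solve (s : String) (out : Int × Int) : Prop := out = solve_alt s
instance (s : String) (out : Int × Int) : Decidable (Spec_solve s out) := by unfold Spec_solve; infer_instance

-- ===== CLAIM (what is proved, stated in full; the proofs are below) =====
def Claim_equal_solve : Prop := ∀ (s : String), Dom_solve s → Pre_solve s → Spec_solve s (solve s)

-- ===== LEMMAS AND PROOFS =====

-- elements at even / odd positions
def pvEvens {α : Type} : List α → List α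
  | [] => []
  | [x] => [x]
  | x :: _ :: l => x :: pvEvens l

def pvOdds {α : Type} : List α → List α
  | [] => []
  | [_] => []
  | _ :: y :: l => y :: pvOdds l

theorem mem_pvEvens {α : Type} : ∀ {l : List α} {x : α}, x ∈ pvEvens l → x ∈ l
  | [], _, h => by simp [pvEvens] at h
  | [_], _, h => by simpa [pvEvens] using h
  | a :: b :: l, x, h => by
    rcases (List.mem_cons.mp (by simpa [pvEvens] using h)) with h' | h'
    · simp [h']
    · have := mem_pvEvens (l := l) h'
      simp [this]

theorem digit_mem (ch : Char) (h : ch.isDigit = true) :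
    ch ∈ ['0','1','2','3','4','5','6','7','8','9'] := by
  simp [Char.isDigit] at h
  obtain ⟨h1, h2⟩ := h
  have hch : ∀ (c : Char), ch.val.toNat = c.val.toNat → ch = c := fun c hc =>
    Char.ext (UInt32.toNat_inj.mp hc)
  simp only [List.mem_cons, List.not_mem_nil, or_false]
  set n := ch.val.toNat with hn
  have hlb : 48 ≤ n := h1
  have hub : n ≤ 57 := h2
  clear h1 h2
  interval_cases n <;>
    first
    | exact Or.inl (hch '0' (by decide))
    | exact Or.inr (Or.inl (hch '1' (by decide)))
    | exact Or.inr (Or.inr (Or.inl (hch '2' (by decide))))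
    | exact Or.inr (Or.inr (Or.inr (Or.inl (hch '3' (by decide)))))
    | exact Or.inr (Or.inr (Or.inr (Or.inr (Or.inl (hch '4' (by decide))))))
    | exact Or.inr (Or.inr (Or.inr (Or.inr (Or.inr (Or.inl (hch '5' (by decide)))))))
    | exact Or.inr (Or.inr (Or.inr (Or.inr (Or.inr (Or.inr (Or.inl (hch '6' (by decide))))))))
    | exact Or.inr (Or.inr (Or.inr (Or.inr (Or.inr (Or.inr (Or.inr (Or.inl (hch '7' (by decide)))))))))
    | exact Or.inr (Or.inr (Or.inr (Or.inr (Or.inr (Or.inr (Or.inr (Or.inr (Or.inl (hch '8' (by decide))))))))))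
    | exact Or.inr (Or.inr (Or.inr (Or.inr (Or.inr (Or.inr (Or.inr (Or.inr (Or.inr (hch '9' (by decide))))))))))

theorem pvDigit_eq_zero_iff (ch : Char) (h : ch.isDigit = true) :
    pvDigit ch = 0 ↔ ch = '0' := by
  have hm := digit_mem ch h
  simp only [List.mem_cons, List.not_mem_nil, or_false] at hm
  rcases hm with rfl | rfl | rfl | rfl | rfl | rfl | rfl | rfl | rfl | rfl <;> decide

-- the body of A's loop, seen on (index, character) pairs
def pvBody (acc : Int × Int × Int × Int) (p : Int × Char) : Int × Int × Int × Int :=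
  if PySem.Int.mod p.1 2 = 1 then
    (acc.1, acc.2.1 + pvDigit p.2, acc.2.2.1, acc.2.2.2)
  else
    if p.2 ≠ '0' then
      (acc.1 * pvDigit p.2, acc.2.1, acc.2.2.1 + 1, acc.2.2.2)
    else
      (acc.1, acc.2.1, acc.2.2.1 + 1, acc.2.2.2 + 1)

theorem pvMod_two (k : Int) (hk : 0 ≤ k) : PySem.Int.mod k 2 = k % 2 := by
  simp [PySem.Int.mod, Int.fmod_eq_emod]

-- invariant of A's loop: the fold over enumerate cs k (k even) in terms of pvEvens / pvOdds
theorem foldA_enum : ∀ (cs : List Char) (k : Int), 0 ≤ k → k % 2 = 0 →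
    ∀ (c l o1 o2 : Int),
    (PySem.List.enumerate cs k).foldl pvBody (c, l, o1, o2) =
      (((pvEvens cs).filter (fun ch => ch != '0')).foldl (fun a ch => a * pvDigit ch) c,
       l + (((pvOdds cs).map pvDigit).sum),
       o1 + ((pvEvens cs).length : Int),
       o2 + (((pvEvens cs).filter (fun ch => ch == '0')).length : Int))
  | [], k, hk, hk2, c, l, o1, o2 => by
    simp [PySem.List.enumerate, pvEvens, pvOdds]
  | [x], k, hk, hk2, c, l, o1, o2 => by
    have hm : PySem.Int.mod k 2 ≠ 1 := by rw [pvMod_two k hk]; omega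
    have he : PySem.List.enumerate [x] k = [(k, x)] := by
      simp [PySem.List.enumerate_cons, PySem.List.enumerate]
    rw [he, List.foldl_cons, List.foldl_nil]
    by_cases hx : x = '0'
    · rw [show pvBody (c, l, o1, o2) (k, x) = (c, l, o1 + 1, o2 + 1) from by
        simp only [pvBody]; rw [if_neg hm, if_neg (show ¬ x ≠ '0' from by simp [hx])]]
      subst hx
      simp [pvEvens, pvOdds, List.filter]
    · rw [show pvBody (c, l, o1, o2) (k, x) = (c * pvDigit x, l, o1 + 1, o2) from by
        simp only [pvBody]; rw [if_neg hm, if_pos hx]]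
      simp [pvEvens, pvOdds, List.filter, hx]
  | x :: y :: cs, k, hk, hk2, c, l, o1, o2 => by
    have hm : PySem.Int.mod k 2 ≠ 1 := by rw [pvMod_two k hk]; omega
    have hm1 : PySem.Int.mod (k + 1) 2 = 1 := by rw [pvMod_two (k+1) (by omega)]; omega
    rw [PySem.List.enumerate_cons, PySem.List.enumerate_cons, List.foldl_cons, List.foldl_cons]
    rw [show k + 1 + 1 = k + 2 from by ring]
    by_cases hx : x = '0'
    · rw [show pvBody (c, l, o1, o2) (k, x) = (c, l, o1 + 1, o2 + 1) from by
        simp only [pvBody]; rw [if_neg hm, if_neg (show ¬ x ≠ '0' from by simp [hx])]]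
      rw [show pvBody (c, l, o1 + 1, o2 + 1) (k + 1, y) = (c, l + pvDigit y, o1 + 1, o2 + 1) from by
        simp only [pvBody]; rw [if_pos hm1]]
      rw [foldA_enum cs (k + 2) (by omega) (by omega)]
      subst hx
      simp only [pvEvens, pvOdds, List.filter, List.map_cons, List.sum_cons, List.length_cons,
        decide_true, decide_false, bne_self_eq_false, beq_self_eq_true, Prod.mk.injEq]
      and_intros <;> first | trivial | rfl | ring1 | omega
    · rw [show pvBody (c, l, o1, o2) (k, x) = (c * pvDigit x, l, o1 + 1, o2) from by
        simp only [pvBody]; rw [if_neg hm, if_pos hx]]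
      rw [show pvBody (c * pvDigit x, l, o1 + 1, o2) (k + 1, y)
            = (c * pvDigit x, l + pvDigit y, o1 + 1, o2) from by
        simp only [pvBody]; rw [if_pos hm1]]
      rw [foldA_enum cs (k + 2) (by omega) (by omega)]
      have hb : (x != '0') = true := by simp [hx]
      have hb2 : (x == '0') = false := by simp [hx]
      simp only [pvEvens, pvOdds, List.filter, hb, hb2, List.map_cons, List.sum_cons,
        List.length_cons, List.foldl_cons, Prod.mk.injEq]
      and_intros <;> first | trivial | rfl | ring1 | omega

-- A's pyRange fold is the enumerate fold
theorem foldA_eq_enum (s : String) :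
    (PySem.List.pyRange 0 (PySem.Str.len s) 1).foldl
      (fun (acc : Int × Int × Int × Int) i =>
        if PySem.Int.mod i 2 = 1 then
          (acc.1, acc.2.1 + ((PySem.Str.pyGet? s i).map pvDigit).getD 0, acc.2.2.1, acc.2.2.2)
        else
          if PySem.Str.pyGet? s i ≠ some '0' then
            (acc.1 * ((PySem.Str.pyGet? s i).map pvDigit).getD 0, acc.2.1, acc.2.2.1 + 1, acc.2.2.2)
          else
            (acc.1, acc.2.1, acc.2.2.1 + 1, acc.2.2.2 + 1))
      (1, 0, 0, 0)
    = (PySem.List.enumerate s.toList 0).foldl pvBody (1, 0, 0, 0) := by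
  rw [PySem.List.enumerate_eq_map_pyRange s.toList ' ', List.foldl_map]
  have hlen : PySem.List.len s.toList = PySem.Str.len s := by
    simp [PySem.List.len, PySem.Str.len]
  rw [hlen]
  apply PySem.List.foldl_congr_mem
  intro acc i hi
  obtain ⟨h0, hlt⟩ := PySem.List.mem_pyRange_one.mp hi
  rw [PySem.Str.len_eq] at hlt
  have hget : PySem.List.pyGet? s.toList i = some (PySem.List.pyGetD s.toList i ' ') := by
    rw [PySem.List.pyGet?_eq_some_getElem s.toList h0 hlt,
      PySem.List.pyGetD_eq_getElem s.toList ' ' h0 hlt]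
  simp [pvBody, hget]

-- B's two slices are pvEvens / pvOdds
theorem filterMap_evens {α : Type} : ∀ (cs : List α),
    (List.range ((cs.length + 1) / 2)).filterMap (fun k => cs[2 * k]?) = pvEvens cs
  | [] => by simp [pvEvens]
  | [x] => by norm_num [pvEvens, List.range_succ]; rfl
  | x :: y :: cs => by
    have hn : ((x :: y :: cs).length + 1) / 2 = (cs.length + 1) / 2 + 1 := by
      simp only [List.length_cons]; omega
    rw [hn, List.range_succ_eq_map, List.filterMap_cons, List.filterMap_map]
    have hf : ((fun k => (x :: y :: cs)[2 * k]?) ∘ Nat.succ) = fun k => cs[2 * k]? := by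
      funext k
      show (x :: y :: cs)[2 * Nat.succ k]? = cs[2 * k]?
      rw [show 2 * Nat.succ k = 2 * k + 1 + 1 from by omega,
        List.getElem?_cons_succ, List.getElem?_cons_succ]
    rw [hf, filterMap_evens cs]
    simp [pvEvens]

theorem filterMap_odds {α : Type} : ∀ (cs : List α),
    (List.range (cs.length / 2)).filterMap (fun k => cs[2 * k + 1]?) = pvOdds cs
  | [] => by simp [pvOdds]
  | [x] => by simp [pvOdds]
  | x :: y :: cs => by
    have hn : (x :: y :: cs).length / 2 = cs.length / 2 + 1 := by
      simp only [List.length_cons]; omega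
    rw [hn, List.range_succ_eq_map, List.filterMap_cons, List.filterMap_map]
    have hf : ((fun k => (x :: y :: cs)[2 * k + 1]?) ∘ Nat.succ) = fun k => cs[2 * k + 1]? := by
      funext k
      show (x :: y :: cs)[2 * Nat.succ k + 1]? = cs[2 * k + 1]?
      rw [show 2 * Nat.succ k + 1 = 2 * k + 1 + 1 + 1 from by omega,
        List.getElem?_cons_succ, List.getElem?_cons_succ]
    rw [hf, filterMap_odds cs]
    simp [pvOdds]

theorem slice?_from0_step2 {α : Type} (xs : List α) :
    PySem.List.slice? xs (some 0) none 2 = some (pvEvens xs) := by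
  simp only [PySem.List.slice?, PySem.List.sliceIndices]
  norm_num
  have hc : (if 0 < xs.length then (((xs.length : Int) + 2 - 1) / 2).toNat else 0)
      = (xs.length + 1) / 2 := by split <;> omega
  have hf : (fun (k : ℕ) => xs[((2 : Int) * (k : Int)).toNat]?) = fun k => xs[2 * k]? := by
    funext k
    rw [show ((2 : Int) * (k : Int)).toNat = 2 * k from by omega]
  rw [hc, hf, filterMap_evens]

theorem slice?_from1_step2 {α : Type} : ∀ (xs : List α),
    PySem.List.slice? xs (some 1) none 2 = some (pvOdds xs)
  | [] => by simp [PySem.List.slice?, PySem.List.sliceIndices, pvOdds]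
  | a :: l => by
    simp only [PySem.List.slice?, PySem.List.sliceIndices]
    norm_num
    have hc : (if 0 < l.length then (((l.length : Int) + 2 - 1) / 2).toNat else 0)
        = (a :: l).length / 2 := by
      simp only [List.length_cons]
      split <;> omega
    have hf : (fun (k : ℕ) => (a :: l)[((1 : Int) + 2 * (k : Int)).toNat]?)
        = fun k => (a :: l)[2 * k + 1]? := by
      funext k
      rw [show ((1 : Int) + 2 * (k : Int)).toNat = 2 * k + 1 from by omega]
    rw [hc, hf, filterMap_odds]

-- ===== VERDICT (by name: the statement is the Claim_ definition above) =====
theorem solve_spec : Claim_equal_solve := by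
  unfold Claim_equal_solve
  intro s _ hpre0
  have hpre : ∀ ch ∈ s.toList, ch.isDigit = true := by
    simpa [Pre_solve, List.all_eq_true] using hpre0
  unfold Spec_solve
  simp only [solve, solve_alt]
  rw [foldA_eq_enum s]
  rw [foldA_enum s.toList 0 (by omega) (by decide) 1 0 0 0]
  have hsl0 : PySem.Str.slice? s (some 0) none 2 = some (String.ofList (pvEvens s.toList)) := by
    simp [PySem.Str.slice?, PySem.Chars.slice?_eq_listSlice?, slice?_from0_step2]
  have hsl1 : PySem.Str.slice? s (some 1) none 2 = some (String.ofList (pvOdds s.toList)) := by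
    simp [PySem.Str.slice?, PySem.Chars.slice?_eq_listSlice?, slice?_from1_step2]
  rw [hsl0, hsl1]
  simp only [Option.getD_some]
  rw [show (String.ofList (pvEvens s.toList)).toList = pvEvens s.toList from by simp,
      show (String.ofList (pvOdds s.toList)).toList = pvOdds s.toList from by simp]
  set E := pvEvens s.toList with hEdef
  have hED : ∀ ch ∈ E, ch.isDigit = true := fun ch h => hpre ch (mem_pvEvens h)
  have hfilter : (E.map pvDigit).filter (fun d => d != 0)
      = (E.filter (fun ch => ch != '0')).map pvDigit := by
    rw [List.filter_map]
    congr 1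
    apply List.filter_congr
    intro ch hch
    have hz := pvDigit_eq_zero_iff ch (hED ch hch)
    by_cases h : ch = '0'
    · subst h; decide
    · have hnz : pvDigit ch ≠ 0 := fun hh => h (hz.mp hh)
      show ((fun d => d != 0) ∘ pvDigit) ch = (ch != '0')
      simp only [Function.comp_apply]
      rw [show (pvDigit ch != 0) = true from by simpa using hnz,
        show (ch != '0') = true from by simpa using h]
  rw [hfilter]
  have hall : (E.filter (fun ch => ch != '0') = []) ↔ (∀ ch ∈ E, ch = '0') := by
    rw [List.filter_eq_nil_iff]; simp
  have hlen2 : ((E.filter (fun ch => ch == '0')).length = E.length) ↔ (∀ ch ∈ E, ch = '0') := by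
    rw [List.length_filter_eq_length_iff]; simp
  simp only [zero_add]
  by_cases hc : ∀ ch ∈ E, ch = '0'
  · have hA : ((E.length : Int)) = ((E.filter (fun ch => ch == '0')).length : Int) := by
      exact_mod_cast (hlen2.mpr hc).symm
    have hB : ((E.filter (fun ch => ch != '0')).map pvDigit).isEmpty = true := by
      rw [List.isEmpty_iff, List.map_eq_nil_iff]
      exact hall.mpr hc
    rw [if_pos hA, if_pos hB]
  · have hA : ¬ ((E.length : Int)) = ((E.filter (fun ch => ch == '0')).length : Int) := by
      intro h
      exact hc (hlen2.mp (by exact_mod_cast h.symm))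
    have hB : ¬ ((E.filter (fun ch => ch != '0')).map pvDigit).isEmpty = true := by
      rw [List.isEmpty_iff, List.map_eq_nil_iff, hall]
      exact hc
    rw [if_neg hA, if_neg hB, List.foldl_map]
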